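-- pv_equiv track=rewrite | github.com/tracy-talent/curriculum | NLP/pytorch-ner/src/utils.py | extract_kvpairs_in_bio
-- ===== SOURCE A (Python) =====
-- def extract_kvpairs_in_bio(bio_seq, word_seq):
--     assert len(bio_seq) == len(word_seq)
--     pairs = list()
--     pre_bio = "O"
--     v = ""
--     spos = -1
--     for i, bio in enumerate(bio_seq):
--         word = word_seq[i]
--         if bio == "O":
--             if v != "":
--                 pairs.append(((spos, i), pre_bio[2:], v))
--             v = ""
--         elif bio[0] == "B":
--             if v != "":
--                 pairs.append(((spos, i), pre_bio[2:], v))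
--             v = word[2:] if word.startswith('##') else word
--             spos = i
--         elif bio[0] == "I":
--             if pre_bio[0] == "O" or pre_bio[2:] != bio[2:] or v == "":
--                 if v != "":
--                     pairs.append(((spos, i), pre_bio[2:], v))
--                 v = ""
--             else:
--                 v += word[2:] if word.startswith('##') else word
--         pre_bio = bio
--     if v != "":
--         pairs.append(((spos, len(bio_seq)), pre_bio[2:], v))
--     return pairs
-- ===== SOURCE B (Python) =====
-- def extract_kvpairs_in_bio(bio_seq, word_seq):
--     assert len(bio_seq) == len(word_seq)
--     n = len(bio_seq)
--     runs = []  # (start, exclusive end, entity type, word tokens of the run)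
--     i = 0
--     while i < n:
--         if bio_seq[i].startswith("B"):
--             ty = bio_seq[i][2:]
--             words = [word_seq[i]]
--             j = i + 1
--             while j < n and bio_seq[j].startswith("I") and bio_seq[j][2:] == ty:
--                 words.append(word_seq[j])
--                 j += 1
--             runs.append((i, j, ty, words))
--             i = j
--         else:
--             i += 1
--     return [((s, e), ty, "".join(w[2:] if w.startswith("##") else w for w in words))
--             for (s, e, ty, words) in runs]
-- ===== Notes on version B (the rewrite author's own statement) =====
-- stated objective: alternative
-- what changed: A is a single scan carrying (pending value, previous tag, start) state and flushing a pair at every boundary; B first collects maximal entity runs (outer loop over run starts, inner loop extending a run over I tags of the run's type, recording start, exclusive end, type and words) and builds the pairs from the runs in a second pass. Pre_ excludes unequal lengths and empty tags (A raises there) and malformed non-BIO tags placed immediately after a 'B'/'I' tag, where A's keep-the-open-entity-but-remember-the-malformed-tag treatment is an implementation artefact.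
-- intended difference: On inputs where some 'B'-tagged token's word is '' or '##' (so it strips to the empty string), A silently drops the whole entity (even when later I tokens carry real text) because its pending value stays empty, while B emits the run with its concatenated stripped value, which is the intended per-run extraction. — e.g. on extract_kvpairs_in_bio(["B-P", "I-P"], ["##", "x"]): A returns [], B returns [((0, 2), "P", "x")]
-- outside the precondition, e.g. on extract_kvpairs_in_bio(['B', 'x', 'I'], ['a', 'b', 'c']): A returns [((0, 3), '', 'ac')], B returns [((0, 1), '', 'a')]; on extract_kvpairs_in_bio([''], ['w']): A raises IndexError, B returns []
import Mathlib
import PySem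

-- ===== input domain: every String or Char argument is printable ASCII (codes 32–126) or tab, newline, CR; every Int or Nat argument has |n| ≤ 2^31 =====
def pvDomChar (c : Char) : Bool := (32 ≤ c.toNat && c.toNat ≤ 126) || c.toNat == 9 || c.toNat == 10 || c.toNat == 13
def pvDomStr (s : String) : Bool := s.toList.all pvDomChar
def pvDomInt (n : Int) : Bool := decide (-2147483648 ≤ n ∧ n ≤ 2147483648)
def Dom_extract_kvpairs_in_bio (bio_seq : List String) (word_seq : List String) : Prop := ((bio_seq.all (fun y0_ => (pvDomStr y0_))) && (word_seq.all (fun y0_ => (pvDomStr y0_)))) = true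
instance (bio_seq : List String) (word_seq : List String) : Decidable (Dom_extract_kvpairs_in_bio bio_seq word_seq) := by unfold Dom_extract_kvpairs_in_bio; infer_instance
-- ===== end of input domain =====

-- B replaces A's single carried-state flush-on-boundary scan by a two-phase extraction:
-- collect maximal entity runs (start, exclusive end, type, words), then build the pairs
-- from the runs; objective: alternative, same cost.

-- ===== PORT A =====
-- word[2:] if word.startswith('##') else word
def pvStrip (w : String) : String :=
  if PySem.Str.startswith w "##" then PySem.Str.slice w (some 2) none else w

-- tag[2:]
def pvSuffix (t : String) : String := PySem.Str.slice t (some 2) none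

-- the body of A's for-loop; state = (pairs, pre_bio, v, spos)
def pvStepA (st : List ((Int × Int) × String × String) × String × String × Int)
    (i : Int) (bio word : String) :
    List ((Int × Int) × String × String) × String × String × Int :=
  if bio = "O" then
    ((if st.2.2.1 ≠ "" then st.1 ++ [((st.2.2.2, i), pvSuffix st.2.1, st.2.2.1)] else st.1), bio, "", st.2.2.2)
  else if PySem.Str.pyGet? bio 0 = some 'B' then
    ((if st.2.2.1 ≠ "" then st.1 ++ [((st.2.2.2, i), pvSuffix st.2.1, st.2.2.1)] else st.1), bio, pvStrip word, i)
  else if PySem.Str.pyGet? bio 0 = some 'I' then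
    if PySem.Str.pyGet? st.2.1 0 = some 'O' ∨ pvSuffix st.2.1 ≠ pvSuffix bio ∨ st.2.2.1 = "" then
      ((if st.2.2.1 ≠ "" then st.1 ++ [((st.2.2.2, i), pvSuffix st.2.1, st.2.2.1)] else st.1), bio, "", st.2.2.2)
    else (st.1, bio, st.2.2.1 ++ pvStrip word, st.2.2.2)
  else (st.1, bio, st.2.2.1, st.2.2.2)

def extract_kvpairs_in_bio (bio_seq : List String) (word_seq : List String) :
    List ((Int × Int) × String × String) :=
  let st := (PySem.List.enumerate bio_seq).foldl
    (fun st p => pvStepA st p.1 p.2 (PySem.List.pyGetD word_seq p.1 ""))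
    ([], "O", "", -1)
  if st.2.2.1 ≠ "" then st.1 ++ [((st.2.2.2, PySem.List.len bio_seq), pvSuffix st.2.1, st.2.2.1)] else st.1

-- ===== PORT B =====
-- B's inner while loop over the zipped remainder: extend the run over consecutive 'I' tags
-- of the run's type; returns (exclusive end j, the words consumed, the remaining tokens)
def pvScanB (ty : String) (j : Int) (l : List (String × String)) :
    Int × List String × List (String × String) :=
  match l with
  | [] => (j, [], [])
  | (t, w) :: rest =>
    if PySem.Str.startswith t "I" ∧ pvSuffix t = ty then
      ((pvScanB ty (j + 1) rest).1, w :: (pvScanB ty (j + 1) rest).2.1,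
        (pvScanB ty (j + 1) rest).2.2)
    else (j, [], (t, w) :: rest)

-- the remaining tokens are a suffix of the input (needed for pvRuns's termination)
theorem pvScanB_rest_le (ty : String) (j : Int) (l : List (String × String)) :
    (pvScanB ty j l).2.2.length ≤ l.length := by
  induction l generalizing j with
  | nil => simp [pvScanB]
  | cons hd rest ih =>
    obtain ⟨t, w⟩ := hd
    simp only [pvScanB]
    split_ifs <;> simp
    all_goals exact le_trans (ih _) (by omega)

-- B's outer while loop: the list of runs (start, exclusive end, type, words)
def pvRuns (i : Int) (l : List (String × String)) : List (Int × Int × String × List String) :=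
  match l with
  | [] => []
  | (t, w) :: rest =>
    if PySem.Str.startswith t "B" then
      (i, (pvScanB (pvSuffix t) (i + 1) rest).1, pvSuffix t,
        w :: (pvScanB (pvSuffix t) (i + 1) rest).2.1)
        :: pvRuns (pvScanB (pvSuffix t) (i + 1) rest).1 (pvScanB (pvSuffix t) (i + 1) rest).2.2
    else pvRuns (i + 1) rest
termination_by l.length
decreasing_by
  · have := pvScanB_rest_le (pvSuffix t) (i + 1) rest; simp; omega
  · simp

def extract_kvpairs_in_bio_alt (bio_seq : List String) (word_seq : List String) :
    List ((Int × Int) × String × String) :=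
  (pvRuns 0 (bio_seq.zip word_seq)).map
    (fun r => ((r.1, r.2.1), r.2.2.1, PySem.Str.join "" (r.2.2.2.map pvStrip)))

-- ===== PRECONDITION & SPEC =====
-- Pre_ excludes: unequal lengths (A raises AssertionError), an empty tag (A raises
-- IndexError at bio[0]), and a tag that is neither "O" nor 'B…'/'I…' occurring immediately
-- after a 'B…'/'I…' tag — there A's keep-the-open-entity-but-remember-the-malformed-tag
-- treatment is an implementation artefact (elsewhere A simply ignores malformed tags).
def Pre_extract_kvpairs_in_bio (bio_seq : List String) (word_seq : List String) : Prop :=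
  bio_seq.length = word_seq.length ∧ (∀ t ∈ bio_seq, t ≠ "") ∧
    List.IsChain (fun a b =>
      (PySem.Str.startswith a "B" = true ∨ PySem.Str.startswith a "I" = true) →
      (b = "O" ∨ PySem.Str.startswith b "B" = true ∨ PySem.Str.startswith b "I" = true)) bio_seq
instance (bio_seq : List String) (word_seq : List String) : Decidable (Pre_extract_kvpairs_in_bio bio_seq word_seq) := by unfold Pre_extract_kvpairs_in_bio; infer_instance

def pvWitness_extract_kvpairs_in_bio : List String × List String :=
  (["B-PER", "I-PER", "O"], ["Jo", "##hn", "x"])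

-- On inputs where some 'B'-tagged token's word is '' or '##' (stripping to the empty string),
-- A silently drops the whole entity — even when later I tokens carry real text — because its
-- pending value stays empty, while B emits the run with its concatenated stripped value,
-- which is the intended per-run extraction.
def D_extract_kvpairs_in_bio (bio_seq : List String) (word_seq : List String) : Prop :=
  ∃ p ∈ bio_seq.zip word_seq,
    PySem.Str.startswith p.1 "B" = true ∧ (p.2 = "" ∨ p.2 = "##")
instance (bio_seq : List String) (word_seq : List String) : Decidable (D_extract_kvpairs_in_bio bio_seq word_seq) := by unfold D_extract_kvpairs_in_bio; infer_instance

def Spec_extract_kvpairs_in_bio (bio_seq : List String) (word_seq : List String) (out : List ((Int × Int) × String × String)) : Prop := ¬ D_extract_kvpairs_in_bio bio_seq word_seq → out = extract_kvpairs_in_bio_alt bio_seq word_seq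
instance (bio_seq : List String) (word_seq : List String) (out : List ((Int × Int) × String × String)) : Decidable (Spec_extract_kvpairs_in_bio bio_seq word_seq out) := by unfold Spec_extract_kvpairs_in_bio; infer_instance

def pvDiffWitness_extract_kvpairs_in_bio : List String × List String :=
  (["B-P", "I-P"], ["##", "x"])
def pvDiffWitnessOut_extract_kvpairs_in_bio :
    (List ((Int × Int) × String × String)) × (List ((Int × Int) × String × String)) :=
  ([], [((0, 2), "P", "x")])

-- ===== CLAIM (what is proved, stated in full; the proofs are below) =====
def Claim_unchanged_extract_kvpairs_in_bio : Prop := ∀ (bio_seq : List String) (word_seq : List String), Dom_extract_kvpairs_in_bio bio_seq word_seq → Pre_extract_kvpairs_in_bio bio_seq word_seq → Spec_extract_kvpairs_in_bio bio_seq word_seq (extract_kvpairs_in_bio bio_seq word_seq)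
def Claim_changed_extract_kvpairs_in_bio : Prop := Dom_extract_kvpairs_in_bio (pvDiffWitness_extract_kvpairs_in_bio.1) (pvDiffWitness_extract_kvpairs_in_bio.2) ∧ Pre_extract_kvpairs_in_bio (pvDiffWitness_extract_kvpairs_in_bio.1) (pvDiffWitness_extract_kvpairs_in_bio.2) ∧ D_extract_kvpairs_in_bio (pvDiffWitness_extract_kvpairs_in_bio.1) (pvDiffWitness_extract_kvpairs_in_bio.2) ∧ extract_kvpairs_in_bio (pvDiffWitness_extract_kvpairs_in_bio.1) (pvDiffWitness_extract_kvpairs_in_bio.2) = pvDiffWitnessOut_extract_kvpairs_in_bio.1 ∧ extract_kvpairs_in_bio_alt (pvDiffWitness_extract_kvpairs_in_bio.1) (pvDiffWitness_extract_kvpairs_in_bio.2) = pvDiffWitnessOut_extract_kvpairs_in_bio.2 ∧ pvDiffWitnessOut_extract_kvpairs_in_bio.1 ≠ pvDiffWitnessOut_extract_kvpairs_in_bio.2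

def Claim_exact_extract_kvpairs_in_bio : Prop := ∀ (bio_seq : List String) (word_seq : List String), Dom_extract_kvpairs_in_bio bio_seq word_seq → Pre_extract_kvpairs_in_bio bio_seq word_seq → D_extract_kvpairs_in_bio bio_seq word_seq → extract_kvpairs_in_bio bio_seq word_seq ≠ extract_kvpairs_in_bio_alt bio_seq word_seq

-- ===== LEMMAS AND PROOFS =====

-- string facts
theorem pv_append_ne (v x : String) (h : v ≠ "") : v ++ x ≠ "" := by
  intro hvx
  apply h
  have := congrArg String.toList hvx
  simp at this
  simp [this.1]

theorem pv_join_nil : PySem.Str.join "" ([] : List String) = "" := rfl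

theorem pv_join_cons (x : String) (xs : List String) :
    PySem.Str.join "" (x :: xs) = x ++ PySem.Str.join "" xs := by
  cases xs with
  | nil => simp [PySem.Str.join]
  | cons y ys => simp [PySem.Str.join, PySem.Chars.join_cons_cons]

-- s.startswith(c) for a one-character c is s[0] == c
theorem pv_sw (s p : String) (c : Char) (hp : p.toList = [c]) :
    PySem.Str.startswith s p = true ↔ PySem.Str.pyGet? s 0 = some c := by
  simp [pysem, hp]
  cases s.toList with
  | nil => simp
  | cons d t => simp [List.prefix_cons_iff, eq_comm]

-- strip(w) is empty exactly for the words "" and "##"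
theorem pv_strip_empty (w : String) : pvStrip w = "" ↔ (w = "" ∨ w = "##") := by
  by_cases hsw : PySem.Str.startswith w "##" = true
  · have hp : ['#', '#'] <+: w.toList := by
      simpa [pysem] using hsw
    obtain ⟨t, ht⟩ := hp
    have htl : w.toList = '#' :: '#' :: t := by simpa using ht.symm
    have hw : w = String.ofList ('#' :: '#' :: t) := by
      have := congrArg String.ofList htl
      simpa using this
    have h2 : (PySem.Str.slice w (some 2) none).toList = t := by
      have hb : (PySem.Str.slice w (some 2) none).toList
          = PySem.List.slice w.toList (some 2) none := by simp [pysem]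
      rw [hb, htl]
      rw [show (some (2 : Int)) = some ((2 : Nat) : Int) from rfl,
        PySem.List.slice_from_natCast]
      simp
    have hs : pvStrip w = String.ofList t := by
      rw [pvStrip, if_pos hsw]
      have := congrArg String.ofList h2
      simpa using this
    constructor
    · intro h
      right
      rw [hs] at h
      have ht0 : t = [] := by
        have := congrArg String.toList h
        simpa using this
      rw [hw, ht0]
    · intro h
      rcases h with h | h
      · rw [h] at hsw; exact absurd hsw (by decide)
      · rw [h]; decide
  · rw [pvStrip, if_neg hsw]
    constructor
    · intro h; exact Or.inl h
    · intro h
      rcases h with h | h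
      · exact h
      · rw [h] at hsw; exact absurd (by decide) hsw

-- A's loop as a structural recursion over the zipped sequence (final flush folded into the base case)
def pvARec (st : List ((Int × Int) × String × String) × String × String × Int)
    (i : Int) (l : List (String × String)) : List ((Int × Int) × String × String) :=
  match l with
  | [] => if st.2.2.1 ≠ "" then st.1 ++ [((st.2.2.2, i), pvSuffix st.2.1, st.2.2.1)] else st.1
  | (b, w) :: rest => pvARec (pvStepA st i b w) (i + 1) rest

-- A's port (enumerate + indexing into word_seq, then trailing flush) is pvARec on the zip
theorem pv_fold_eq (bs : List String) : ∀ (ws w0 : List String)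
    (st : List ((Int × Int) × String × String) × String × String × Int),
    bs.length = ws.length →
    (let st' := (PySem.List.enumerate bs (w0.length : Int)).foldl
        (fun st p => pvStepA st p.1 p.2 (PySem.List.pyGetD (w0 ++ ws) p.1 "")) st
     if st'.2.2.1 ≠ "" then
       st'.1 ++ [((st'.2.2.2, ((w0.length + bs.length : Nat) : Int)), pvSuffix st'.2.1, st'.2.2.1)]
     else st'.1)
    = pvARec st (w0.length : Int) (bs.zip ws) := by
  induction bs with
  | nil =>
    intro ws w0 st _
    simp [PySem.List.enumerate_nil, pvARec]
  | cons b bs ih =>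
    intro ws w0 st h
    cases ws with
    | nil => simp at h
    | cons w ws =>
      simp only [PySem.List.enumerate_cons, List.foldl_cons, List.zip_cons_cons, pvARec,
        List.length_cons]
      have hw : PySem.List.pyGetD (w0 ++ w :: ws) (w0.length : Int) "" = w := by
        simp [PySem.List.pyGetD_natCast, List.getD_eq_getElem?_getD]
      rw [hw]
      have h' : bs.length = ws.length := by simpa using h
      have this := ih ws (w0 ++ [w]) (pvStepA st (w0.length : Int) b w) h'
      have e3 : (w0 ++ [w]).length + bs.length = w0.length + (bs.length + 1) := by
        simp; omega
      rw [e3] at this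
      have e1 : (((w0 ++ [w]).length : Nat) : Int) = (w0.length : Int) + 1 := by simp
      rw [e1] at this
      have e2 : w0 ++ [w] ++ ws = w0 ++ w :: ws := by simp
      rw [e2] at this
      exact this

-- The second pass of B, applied to a run list
def pvOut (rs : List (Int × Int × String × List String)) :
    List ((Int × Int) × String × String) :=
  rs.map (fun r => ((r.1, r.2.1), r.2.2.1, PySem.Str.join "" (r.2.2.2.map pvStrip)))

-- pvStepA on each kind of tag
theorem pv_stepA_O (pairs : List ((Int × Int) × String × String)) (p v : String) (spos i : Int) (w : String) :
    pvStepA (pairs, p, v, spos) i "O" w =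
      ((if v ≠ "" then pairs ++ [((spos, i), pvSuffix p, v)] else pairs), "O", "", spos) := by
  simp [pvStepA]

theorem pv_stepA_B (pairs : List ((Int × Int) × String × String)) (p v : String) (spos i : Int) (b w : String)
    (hO : ¬ b = "O") (hB : PySem.Str.pyGet? b 0 = some 'B') :
    pvStepA (pairs, p, v, spos) i b w =
      ((if v ≠ "" then pairs ++ [((spos, i), pvSuffix p, v)] else pairs), b, pvStrip w, i) := by
  simp only [pvStepA]; rw [if_neg hO, if_pos hB]

theorem pv_stepA_I_break (pairs : List ((Int × Int) × String × String)) (p v : String) (spos i : Int) (b w : String)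
    (hO : ¬ b = "O") (hB : ¬ PySem.Str.pyGet? b 0 = some 'B') (hI : PySem.Str.pyGet? b 0 = some 'I')
    (hbr : PySem.Str.pyGet? p 0 = some 'O' ∨ pvSuffix p ≠ pvSuffix b ∨ v = "") :
    pvStepA (pairs, p, v, spos) i b w =
      ((if v ≠ "" then pairs ++ [((spos, i), pvSuffix p, v)] else pairs), b, "", spos) := by
  simp only [pvStepA]; rw [if_neg hO, if_neg hB, if_pos hI, if_pos hbr]

theorem pv_stepA_I_cont (pairs : List ((Int × Int) × String × String)) (p v : String) (spos i : Int) (b w : String)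
    (hO : ¬ b = "O") (hB : ¬ PySem.Str.pyGet? b 0 = some 'B') (hI : PySem.Str.pyGet? b 0 = some 'I')
    (hbr : ¬ (PySem.Str.pyGet? p 0 = some 'O' ∨ pvSuffix p ≠ pvSuffix b ∨ v = "")) :
    pvStepA (pairs, p, v, spos) i b w = (pairs, b, v ++ pvStrip w, spos) := by
  simp only [pvStepA]
  split_ifs
  all_goals simp_all

theorem pv_stepA_other (pairs : List ((Int × Int) × String × String)) (p v : String) (spos i : Int) (b w : String)
    (hO : ¬ b = "O") (hB : ¬ PySem.Str.pyGet? b 0 = some 'B') (hI : ¬ PySem.Str.pyGet? b 0 = some 'I') :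
    pvStepA (pairs, p, v, spos) i b w = (pairs, b, v, spos) := by
  simp only [pvStepA]; rw [if_neg hO, if_neg hB, if_neg hI]

-- a tag opening or continuing an entity / a wellformed BIO tag
def pvBI (t : String) : Prop :=
  PySem.Str.startswith t "B" = true ∨ PySem.Str.startswith t "I" = true
def pvTag (t : String) : Prop := t = "O" ∨ pvBI t

-- no empty-stripping word under a 'B' tag, over the zipped remainder
def pvNoD (l : List (String × String)) : Prop :=
  ∀ p ∈ l, PySem.Str.startswith p.1 "B" = true → pvStrip p.2 ≠ ""

-- the heart of the equivalence: with no pending value A's machine produces B's runs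
-- (first conjunct), and with a pending value (possible only below a 'B'/'I' tag, so the
-- head, if any, is wellformed) it finishes the current run exactly as B's inner scan does
theorem pv_main : ∀ (l : List (String × String)), pvNoD l →
    List.IsChain (fun a b => pvBI a.1 → pvTag b.1) l →
    (∀ (i : Int) (pairs : List ((Int × Int) × String × String)) (p : String) (spos : Int),
        pvARec (pairs, p, "", spos) i l = pairs ++ pvOut (pvRuns i l))
  ∧ ((∀ x ∈ l.head?, pvTag x.1) →
     ∀ (i : Int) (pairs : List ((Int × Int) × String × String)) (p v : String) (spos : Int)
        (ty : String), v ≠ "" → ¬ PySem.Str.pyGet? p 0 = some 'O' → pvSuffix p = ty →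
        pvARec (pairs, p, v, spos) i l =
          pairs ++ ((spos, (pvScanB ty i l).1), ty,
              v ++ PySem.Str.join "" ((pvScanB ty i l).2.1.map pvStrip))
            :: pvOut (pvRuns (pvScanB ty i l).1 (pvScanB ty i l).2.2)) := by
  intro l
  induction l with
  | nil =>
    intro _ _
    constructor
    · intro i pairs p spos
      simp [pvARec, pvRuns, pvOut]
    · intro _ i pairs p v spos ty hv hpO hty
      simp [pvARec, pvScanB, pvRuns, pvOut, hv, hty, pv_join_nil]
  | cons hd rest ih =>
    intro hnd hch
    obtain ⟨b, w⟩ := hd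
    have hndr : pvNoD rest := fun p hp => hnd p (List.mem_cons_of_mem _ hp)
    rw [List.isChain_cons] at hch
    obtain ⟨hR, hchr⟩ := hch
    obtain ⟨ih1, ih2'⟩ := ih hndr hchr
    have hd2 : pvBI b → ∀ x ∈ rest.head?, pvTag x.1 := fun hbi x hx => hR x hx hbi
    have swB := pv_sw b "B" 'B' (by decide)
    have swI := pv_sw b "I" 'I' (by decide)
    constructor
    · -- L1 : no pending value
      intro i pairs p spos
      by_cases hpt : pvTag b
      · rw [pvTag, pvBI] at hpt
        rcases hpt with hO | hB | hI
        · subst hO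
          rw [pvARec, pv_stepA_O]
          simp only [ne_eq, not_true_eq_false, if_false]
          rw [ih1 (i + 1) pairs "O" spos, pvRuns, if_neg (by decide)]
        · have hgB := swB.mp hB
          have hO' : ¬ b = "O" := by rintro rfl; exact absurd hgB (by decide)
          rw [pvARec, pv_stepA_B pairs p "" spos i b w hO' hgB]
          simp only [ne_eq, not_true_eq_false, if_false]
          have hsw : pvStrip w ≠ "" := hnd (b, w) List.mem_cons_self hB
          rw [ih2' (hd2 (Or.inl hB)) (i + 1) pairs b (pvStrip w) i (pvSuffix b) hsw
            (by rw [hgB]; simp) rfl]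
          rw [pvRuns, if_pos hB]
          simp only [pvOut, List.map, pv_join_cons]
        · have hgI := swI.mp hI
          have hO' : ¬ b = "O" := by rintro rfl; exact absurd hgI (by decide)
          have hgB' : ¬ PySem.Str.pyGet? b 0 = some 'B' := by
            rw [hgI]; simp
          rw [pvARec, pv_stepA_I_break pairs p "" spos i b w hO' hgB' hgI
            (Or.inr (Or.inr rfl))]
          simp only [ne_eq, not_true_eq_false, if_false]
          rw [ih1 (i + 1) pairs b spos, pvRuns,
            if_neg (by rw [Bool.not_eq_true, Bool.eq_false_iff]; intro h; exact hgB' (swB.mp h))]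
      · -- malformed tag with no open entity: A ignores it, B skips it
        rw [pvTag, pvBI] at hpt
        push Not at hpt
        obtain ⟨hO', hBf, hIf⟩ := hpt
        have hgB' : ¬ PySem.Str.pyGet? b 0 = some 'B' := fun h => hBf (swB.mpr h)
        have hgI' : ¬ PySem.Str.pyGet? b 0 = some 'I' := fun h => hIf (swI.mpr h)
        rw [pvARec, pv_stepA_other pairs p "" spos i b w hO' hgB' hgI']
        rw [ih1 (i + 1) pairs b spos, pvRuns,
          if_neg (by rw [Bool.not_eq_true, Bool.eq_false_iff]; intro h; exact hBf h)]
    · -- L2 : pending value v, open run of type ty (head wellformed)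
      intro hhd i pairs p v spos ty hv hpO hty
      have hpt : pvTag b := hhd (b, w) (by simp)
      rw [pvTag, pvBI] at hpt
      have flush_eq : (if v ≠ "" then pairs ++ [((spos, i), pvSuffix p, v)] else pairs)
          = pairs ++ [((spos, i), ty, v)] := by rw [if_pos hv, hty]
      rcases hpt with hO | hB | hI
      · subst hO
        rw [pvARec, pv_stepA_O, flush_eq, ih1 (i + 1) _ "O" spos]
        rw [pvScanB, if_neg (by rintro ⟨h1, -⟩; exact absurd h1 (by decide))]
        rw [pvRuns, if_neg (by decide)]
        simp [List.append_assoc, pv_join_nil]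
      · have hgB := swB.mp hB
        have hO' : ¬ b = "O" := by rintro rfl; exact absurd hgB (by decide)
        have hsw : pvStrip w ≠ "" := hnd (b, w) List.mem_cons_self hB
        rw [pvARec, pv_stepA_B pairs p v spos i b w hO' hgB, flush_eq]
        rw [ih2' (hd2 (Or.inl hB)) (i + 1) _ b (pvStrip w) i (pvSuffix b) hsw
          (by rw [hgB]; simp) rfl]
        rw [pvScanB, if_neg (by
          rintro ⟨h1, -⟩
          have := swI.mp h1
          rw [hgB] at this
          exact absurd this (by simp))]
        rw [pvRuns, if_pos hB]
        simp [pvOut, pv_join_cons, List.append_assoc, pv_join_nil]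
      · have hgI := swI.mp hI
        have hO' : ¬ b = "O" := by rintro rfl; exact absurd hgI (by decide)
        have hgB' : ¬ PySem.Str.pyGet? b 0 = some 'B' := by rw [hgI]; simp
        have hBf : ¬ PySem.Str.startswith b "B" = true := fun h => hgB' (swB.mp h)
        by_cases hty2 : pvSuffix b = ty
        · -- continue the run
          rw [pvARec, pv_stepA_I_cont pairs p v spos i b w hO' hgB' hgI
            (by
              rintro (h1 | h2 | h3)
              · exact hpO h1
              · exact h2 (by rw [hty, hty2])
              · exact hv h3)]
          rw [ih2' (hd2 (Or.inr hI)) (i + 1) pairs b (v ++ pvStrip w) spos ty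
            (pv_append_ne v _ hv) (by rw [hgI]; simp) hty2]
          rw [pvScanB, if_pos ⟨hI, hty2⟩]
          simp [pv_join_cons, String.append_assoc]
        · -- type mismatch: the run ends here
          rw [pvARec, pv_stepA_I_break pairs p v spos i b w hO' hgB' hgI
            (Or.inr (Or.inl (by rw [hty]; exact fun h => hty2 h.symm))), flush_eq]
          rw [ih1 (i + 1) _ b spos]
          rw [pvScanB, if_neg (by rintro ⟨-, h2⟩; exact hty2 h2)]
          rw [pvRuns, if_neg hBf]
          simp [List.append_assoc, pv_join_nil]

-- A's port, rewritten as the structural recursion on the zipped sequence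
theorem pv_A_eq (bs ws : List String) (hlen : bs.length = ws.length) :
    extract_kvpairs_in_bio bs ws = pvARec ([], "O", "", -1) 0 (bs.zip ws) := by
  have hfold := pv_fold_eq bs ws [] ([], "O", "", -1) hlen
  simp only [List.length_nil, Nat.cast_zero, List.nil_append, zero_add] at hfold
  rw [← hfold]
  simp [extract_kvpairs_in_bio, PySem.List.len_eq]

-- B's inner scan moves the index by the number of consumed tokens, leaves the rest as a
-- suffix, and never consumes a 'B' tag
theorem pvScanB_spec (ty : String) (l : List (String × String)) : ∀ (j : Int),
    ∃ c : ℕ, (pvScanB ty j l).1 = j + c ∧ (pvScanB ty j l).2.2 = l.drop c ∧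
      ∀ (k : ℕ) x, k < c → l[k]? = some x → PySem.Str.startswith x.1 "B" = false := by
  induction l with
  | nil =>
    intro j
    exact ⟨0, by simp [pvScanB], by simp [pvScanB], by intro k x hk; omega⟩
  | cons hd rest ih =>
    obtain ⟨t, w⟩ := hd
    intro j
    by_cases hc : PySem.Str.startswith t "I" = true ∧ pvSuffix t = ty
    · obtain ⟨c, h1, h2, h3⟩ := ih (j + 1)
      refine ⟨c + 1, ?_, ?_, ?_⟩
      · rw [pvScanB, if_pos hc]
        rw [show ((pvScanB ty (j + 1) rest).1,
            w :: (pvScanB ty (j + 1) rest).2.1, (pvScanB ty (j + 1) rest).2.2).1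
          = (pvScanB ty (j + 1) rest).1 from rfl, h1]
        push_cast
        ring
      · rw [pvScanB, if_pos hc]
        simpa using h2
      · intro k x hk hx
        cases k with
        | zero =>
          have hxeq : x = (t, w) := by simpa using hx.symm
          rw [hxeq]
          have hgI := (pv_sw t "I" 'I' (by decide)).mp hc.1
          rw [Bool.eq_false_iff]
          intro hBt
          have := (pv_sw t "B" 'B' (by decide)).mp hBt
          rw [hgI] at this
          exact absurd this (by simp)
        | succ k' =>
          exact h3 k' x (by omega) (by simpa using hx)
    · refine ⟨0, ?_, ?_, by intro k x hk; omega⟩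
      · rw [pvScanB, if_neg hc]; simp
      · rw [pvScanB, if_neg hc]
        simp

-- every 'B'-tagged position of the input starts a run of B
theorem pvRuns_start : ∀ (i : Int) (l : List (String × String)) (j₀ : ℕ) (x : String × String),
    l[j₀]? = some x → PySem.Str.startswith x.1 "B" = true →
    ∃ r ∈ pvRuns i l, r.1 = i + j₀ := by
  intro i l
  induction i, l using pvRuns.induct with
  | case1 i =>
    intro j₀ x hx hB
    simp at hx
  | case2 i t w rest hBt ih =>
    intro j₀ x hx hB
    cases j₀ with
    | zero =>
      refine ⟨(i, (pvScanB (pvSuffix t) (i + 1) rest).1, pvSuffix t,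
        w :: (pvScanB (pvSuffix t) (i + 1) rest).2.1), ?_, by simp⟩
      rw [pvRuns, if_pos hBt]
      exact List.mem_cons_self
    | succ j =>
      rw [List.getElem?_cons_succ] at hx
      obtain ⟨c, h1, h2, h3⟩ := pvScanB_spec (pvSuffix t) rest (i + 1)
      have hcj : c ≤ j := by
        by_contra hlt
        have := h3 j x (by omega) hx
        rw [hB] at this
        exact absurd this (by simp)
      have hx' : (pvScanB (pvSuffix t) (i + 1) rest).2.2[j - c]? = some x := by
        rw [h2, List.getElem?_drop, show c + (j - c) = j by omega]
        exact hx
      obtain ⟨r, hr, hr1⟩ := ih (j - c) x hx' hB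
      refine ⟨r, ?_, ?_⟩
      · rw [pvRuns, if_pos hBt]
        exact List.mem_cons_of_mem _ hr
      · rw [hr1, h1]
        push_cast
        omega
  | case3 i t w rest hBt ih =>
    intro j₀ x hx hB
    cases j₀ with
    | zero =>
      have hxeq : x = (t, w) := by simpa using hx.symm
      rw [hxeq] at hB
      exact absurd hB hBt
    | succ j =>
      obtain ⟨r, hr, hr1⟩ := ih j x (by simpa using hx) hB
      refine ⟨r, ?_, ?_⟩
      · rw [pvRuns, if_neg hBt]
        exact hr
      · rw [hr1]
        push_cast
        ring
-- A never emits a pair starting at a position that is not a 'B' tag with a non-empty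
-- stripped word: every start in A's result avoids any such forbidden index i₀
theorem pvARec_starts (l : List (String × String)) : ∀ (i i₀ : Int)
    (pairs : List ((Int × Int) × String × String)) (p v : String) (spos : Int),
    (∀ (j : ℕ) x, l[j]? = some x → PySem.Str.startswith x.1 "B" = true →
        pvStrip x.2 ≠ "" → i + j ≠ i₀) →
    (∀ pr ∈ pairs, pr.1.1 ≠ i₀) → (v ≠ "" → spos ≠ i₀) →
    ∀ pr ∈ pvARec (pairs, p, v, spos) i l, pr.1.1 ≠ i₀ := by
  induction l with
  | nil =>
    intro i i₀ pairs p v spos _ hpairs hspos pr hpr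
    rw [pvARec] at hpr
    split_ifs at hpr with hv
    · rcases List.mem_append.mp hpr with h | h
      · exact hpairs pr h
      · have : pr = ((spos, i), pvSuffix p, v) := by simpa using h
        rw [this]
        exact hspos hv
    · exact hpairs pr hpr
  | cons hd rest ih =>
    obtain ⟨b, w⟩ := hd
    intro i i₀ pairs p v spos hhead hpairs hspos
    have hhead' : ∀ (j : ℕ) x, rest[j]? = some x → PySem.Str.startswith x.1 "B" = true →
        pvStrip x.2 ≠ "" → (i + 1) + j ≠ i₀ := by
      intro j x hx hB hs hEq
      apply hhead (j + 1) x (by simpa using hx) hB hs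
      push_cast at hEq ⊢
      omega
    have hflush : ∀ pr ∈ (if v ≠ "" then pairs ++ [((spos, i), pvSuffix p, v)] else pairs),
        pr.1.1 ≠ i₀ := by
      split_ifs with hv
      · intro pr hpr
        rcases List.mem_append.mp hpr with h | h
        · exact hpairs pr h
        · have : pr = ((spos, i), pvSuffix p, v) := by simpa using h
          rw [this]
          exact hspos hv
      · exact hpairs
    by_cases hO : b = "O"
    · subst hO
      rw [pvARec, pv_stepA_O]
      exact ih (i + 1) i₀ _ "O" "" spos hhead' hflush (fun h => absurd rfl h)
    · by_cases hgB : PySem.Str.pyGet? b 0 = some 'B'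
      · rw [pvARec, pv_stepA_B pairs p v spos i b w hO hgB]
        refine ih (i + 1) i₀ _ b (pvStrip w) i hhead' hflush ?_
        intro hsw
        have hBb : PySem.Str.startswith b "B" = true := (pv_sw b "B" 'B' (by decide)).mpr hgB
        have := hhead 0 (b, w) (by simp) hBb hsw
        simpa using this
      · by_cases hgI : PySem.Str.pyGet? b 0 = some 'I'
        · by_cases hbr : PySem.Str.pyGet? p 0 = some 'O' ∨ pvSuffix p ≠ pvSuffix b ∨ v = ""
          · rw [pvARec, pv_stepA_I_break pairs p v spos i b w hO hgB hgI hbr]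
            exact ih (i + 1) i₀ _ b "" spos hhead' hflush (fun h => absurd rfl h)
          · rw [pvARec, pv_stepA_I_cont pairs p v spos i b w hO hgB hgI hbr]
            have hv : v ≠ "" := fun h => hbr (Or.inr (Or.inr h))
            exact ih (i + 1) i₀ pairs b (v ++ pvStrip w) spos hhead' hpairs
              (fun _ => hspos hv)
        · rw [pvARec, pv_stepA_other pairs p v spos i b w hO hgB hgI]
          exact ih (i + 1) i₀ pairs b v spos hhead' hpairs hspos

-- ===== VERDICT (by name: the statement is the Claim_ definition above) =====
theorem pv_alt_witness :
    extract_kvpairs_in_bio_alt ["B-P", "I-P"] ["##", "x"] = [((0, 2), "P", "x")] := by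
  have h1 : pvScanB (pvSuffix "B-P") ((0 : Int) + 1) [("I-P", "x")] = (2, ["x"], []) := by decide
  have hz : List.zip ["B-P", "I-P"] ["##", "x"] = [("B-P", "##"), ("I-P", "x")] := by decide
  simp only [extract_kvpairs_in_bio_alt, hz]
  rw [pvRuns, if_pos (by decide : PySem.Str.startswith "B-P" "B" = true), h1]
  rw [pvRuns]
  decide

theorem extract_kvpairs_in_bio_spec : Claim_unchanged_extract_kvpairs_in_bio := by
  intro bs ws _ hpre
  unfold Spec_extract_kvpairs_in_bio
  intro hnD
  obtain ⟨hlen, -, hch'⟩ := hpre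
  have hch : List.IsChain (fun a b : String × String => pvBI a.1 → pvTag b.1) (bs.zip ws) := by
    have hmap : (bs.zip ws).map Prod.fst = bs := by
      rw [List.map_fst_zip]
      omega
    have := (List.isChain_map (f := (Prod.fst : String × String → String))
      (R := fun a b => pvBI a → pvTag b) (l := bs.zip ws)).mp ?_
    · exact this
    · rw [hmap]
      exact hch'.imp (fun a b hab => hab)
  have hnd : pvNoD (bs.zip ws) := by
    intro p hp hB hstrip
    exact hnD ⟨p, hp, hB, (pv_strip_empty p.2).mp hstrip⟩
  have hmain := (pv_main (bs.zip ws) hnd hch).1 0 [] "O" (-1)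
  calc extract_kvpairs_in_bio bs ws
      = pvARec ([], "O", "", -1) 0 (bs.zip ws) := pv_A_eq bs ws hlen
    _ = pvOut (pvRuns 0 (bs.zip ws)) := by rw [hmain]; simp
    _ = extract_kvpairs_in_bio_alt bs ws := rfl

theorem extract_kvpairs_in_bio_changed : Claim_changed_extract_kvpairs_in_bio := by
  unfold Claim_changed_extract_kvpairs_in_bio
  exact ⟨by decide, by decide, by decide, by decide, pv_alt_witness, by decide⟩

theorem extract_kvpairs_in_bio_tight : Claim_exact_extract_kvpairs_in_bio := by
  intro bs ws _ hpre hD heq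
  obtain ⟨hlen, -, -⟩ := hpre
  obtain ⟨x, hx, hxB, hxw⟩ := hD
  obtain ⟨j, hj, hxj⟩ := List.mem_iff_getElem.mp hx
  have hxj' : (bs.zip ws)[j]? = some x := by
    rw [List.getElem?_eq_getElem hj, hxj]
  obtain ⟨r, hr, hr1⟩ := pvRuns_start 0 (bs.zip ws) j x hxj' hxB
  have hmem : ((r.1, r.2.1), r.2.2.1, PySem.Str.join "" (r.2.2.2.map pvStrip))
      ∈ extract_kvpairs_in_bio_alt bs ws :=
    List.mem_map_of_mem hr
  have hA : ∀ pr ∈ extract_kvpairs_in_bio bs ws, pr.1.1 ≠ (j : Int) := by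
    rw [pv_A_eq bs ws hlen]
    refine pvARec_starts (bs.zip ws) 0 (j : Int) [] "O" "" (-1) ?_ (by simp) (by simp)
    intro j' x' hx' hB' hs'
    by_cases hjj : j' = j
    · subst hjj
      rw [hxj'] at hx'
      have : x' = x := by simpa using hx'.symm
      rw [this] at hs'
      exact absurd ((pv_strip_empty x.2).mpr hxw) hs'
    · intro hEq
      apply hjj
      omega
  rw [heq] at hA
  have := hA _ hmem
  apply this
  rw [hr1]
  simp
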